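-- pv_equiv track=rewrite | github.com/MrBrantCode/unitest_baseline | mut_generate/mist_train_cf/cf_10379/solution.py | sorted_odds
-- ===== SOURCE A (Python) =====
-- def sorted_odds(original_list):
--     """
--     This function takes a list of integers as input, removes duplicates,
--     filters out even numbers, and returns the remaining unique odd numbers
--     in descending order.
--
--     Args:
--     original_list (list): A list of integers.
--
--     Returns:
--     list: A list of unique odd numbers in descending order.
--     """
--     odd_set = set()
--     for x in original_list:
--         if x % 2 != 0:
--             odd_set.add(x)
--
--     odd_list = list(odd_set)
--     for i in range(len(odd_list)):
--         for j in range(i + 1, len(odd_list)):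
--             if odd_list[i] < odd_list[j]:
--                 odd_list[i], odd_list[j] = odd_list[j], odd_list[i]
--
--     return odd_list
-- ===== SOURCE B (Python) =====
-- def sorted_odds(original_list):
--     # One pass: keep a descending, duplicate-free list of odd numbers,
--     # inserting each new odd value at its position (skip if already present).
--     result = []
--     for x in original_list:
--         if x % 2 != 0:
--             i = 0
--             while i < len(result) and result[i] > x:
--                 i += 1
--             if i == len(result) or result[i] != x:
--                 result.insert(i, x)
--     return result
-- ===== Notes on version B (the rewrite author's own statement) =====
-- stated objective: alternative
-- what changed: Replaces A's two-phase set-building plus quadratic selection-sort-by-swaps with a single pass that inserts each odd value into its place in a descending duplicate-free list.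
import Mathlib
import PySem

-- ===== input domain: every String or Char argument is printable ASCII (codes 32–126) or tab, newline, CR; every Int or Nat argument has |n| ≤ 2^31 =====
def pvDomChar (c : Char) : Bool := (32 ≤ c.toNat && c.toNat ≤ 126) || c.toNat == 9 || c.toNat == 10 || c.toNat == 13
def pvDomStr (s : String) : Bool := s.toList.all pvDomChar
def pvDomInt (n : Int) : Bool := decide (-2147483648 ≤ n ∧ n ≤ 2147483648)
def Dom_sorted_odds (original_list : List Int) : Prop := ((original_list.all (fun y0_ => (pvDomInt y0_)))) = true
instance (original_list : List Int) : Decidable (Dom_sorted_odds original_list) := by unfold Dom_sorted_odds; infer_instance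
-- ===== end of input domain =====

-- B replaces A's set-building pass plus selection-sort-by-swaps with a single insertion pass; return values proved equal.

-- ===== PORT A =====
-- inner loop (for j in range(i+1, …)): carries odd_list[i] as `cur`; a swap writes the old
-- `cur` at position j and takes odd_list[j] as the new `cur`.
def pvSweep (cur : Int) : List Int → Int × List Int
  | [] => (cur, [])
  | y :: ys =>
    if cur < y then
      let p := pvSweep y ys; (p.1, cur :: p.2)
    else
      let p := pvSweep cur ys; (p.1, y :: p.2)

theorem pvSweep_length (cur : Int) (l : List Int) : (pvSweep cur l).2.length = l.length := by
  induction l generalizing cur with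
  | nil => rfl
  | cons y ys ih => simp only [pvSweep]; split <;> simp [ih]

-- outer loop (for i in range(len(odd_list))): iteration i fixes position i with the swept-up
-- maximum and only touches the suffix, so it is the structural recursion on the suffix.
def pvSelSort : List Int → List Int
  | [] => []
  | x :: xs => (pvSweep x xs).1 :: pvSelSort (pvSweep x xs).2
  termination_by l => l.length
  decreasing_by simp [pvSweep_length]

def sorted_odds (original_list : List Int) : List Int :=
  let odd_set := original_list.foldl
    (fun s x => if PySem.Int.mod x 2 ≠ 0 then PySem.Set.add s x else s) PySem.Set.empty
  pvSelSort odd_set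

-- ===== PORT B =====
-- the while/insert body of Source B: walk past strictly larger entries, skip an equal one,
-- otherwise insert x here.
def pvInsDesc (x : Int) : List Int → List Int
  | [] => [x]
  | y :: ys => if x < y then y :: pvInsDesc x ys else if x = y then y :: ys else x :: y :: ys

def sorted_odds_alt (original_list : List Int) : List Int :=
  original_list.foldl (fun r x => if PySem.Int.mod x 2 ≠ 0 then pvInsDesc x r else r) []

-- ===== PRECONDITION & SPEC =====
def Spec_sorted_odds (original_list : List Int) (out : List Int) : Prop := out = sorted_odds_alt original_list
instance (original_list : List Int) (out : List Int) : Decidable (Spec_sorted_odds original_list out) := by unfold Spec_sorted_odds; infer_instance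

-- ===== CLAIM (what is proved, stated in full; the proofs are below) =====
def Claim_equal_sorted_odds : Prop := ∀ (original_list : List Int), Dom_sorted_odds original_list → Spec_sorted_odds original_list (sorted_odds original_list)

-- ===== LEMMAS AND PROOFS =====

theorem pvSweep_perm (cur : Int) (l : List Int) :
    List.Perm ((pvSweep cur l).1 :: (pvSweep cur l).2) (cur :: l) := by
  induction l generalizing cur with
  | nil => rfl
  | cons y ys ih =>
    simp only [pvSweep]
    split
    · exact (List.Perm.swap _ _ _).trans ((ih y).cons cur)
    · exact ((List.Perm.swap _ _ _).trans ((ih cur).cons y)).trans (List.Perm.swap _ _ _)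

theorem pvSweep_fst_ge (cur : Int) (l : List Int) : cur ≤ (pvSweep cur l).1 := by
  induction l generalizing cur with
  | nil => simp [pvSweep]
  | cons y ys ih =>
    simp only [pvSweep]
    split
    · rename_i h; exact le_of_lt (lt_of_lt_of_le h (ih y))
    · exact ih cur

theorem pvSweep_max (cur : Int) (l : List Int) :
    ∀ z ∈ (pvSweep cur l).2, z ≤ (pvSweep cur l).1 := by
  induction l generalizing cur with
  | nil => simp [pvSweep]
  | cons y ys ih =>
    simp only [pvSweep]
    split
    · rename_i h
      intro z hz
      rcases List.mem_cons.1 hz with rfl | hz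
      · exact le_of_lt (lt_of_lt_of_le h (pvSweep_fst_ge y ys))
      · exact ih y z hz
    · rename_i h
      intro z hz
      rcases List.mem_cons.1 hz with rfl | hz
      · exact le_trans (not_lt.1 h) (pvSweep_fst_ge cur ys)
      · exact ih cur z hz

theorem pvSelSort_perm (l : List Int) : List.Perm (pvSelSort l) l := by
  induction l using pvSelSort.induct with
  | case1 => rw [pvSelSort]
  | case2 x xs ih =>
    rw [pvSelSort]
    exact (ih.cons (pvSweep x xs).1).trans (pvSweep_perm x xs)

theorem pvSelSort_pairwise (l : List Int) : (pvSelSort l).Pairwise (· ≥ ·) := by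
  induction l using pvSelSort.induct with
  | case1 => simp [pvSelSort]
  | case2 x xs ih =>
    rw [pvSelSort]
    refine List.pairwise_cons.2 ⟨?_, ih⟩
    intro z hz
    exact pvSweep_max x xs z ((pvSelSort_perm _).mem_iff.1 hz)

-- the odd set built by A's first loop
theorem pvOddSet_mem (l : List Int) (s : List Int) (a : Int) :
    (a ∈ l.foldl (fun s x => if PySem.Int.mod x 2 ≠ 0 then PySem.Set.add s x else s) s ↔
      a ∈ s ∨ (a ∈ l ∧ PySem.Int.mod a 2 ≠ 0)) := by
  induction l generalizing s with
  | nil => simp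
  | cons y ys ih =>
    simp only [List.foldl_cons]
    by_cases h : PySem.Int.mod y 2 ≠ 0
    · rw [if_pos h, ih, PySem.Set.mem_add]
      simp only [List.mem_cons]
      constructor
      · rintro ((ha | rfl) | ⟨hy, ho⟩)
        · exact Or.inl ha
        · exact Or.inr ⟨Or.inl rfl, h⟩
        · exact Or.inr ⟨Or.inr hy, ho⟩
      · rintro (ha | ⟨rfl | hy, ho⟩)
        · exact Or.inl (Or.inl ha)
        · exact Or.inl (Or.inr rfl)
        · exact Or.inr ⟨hy, ho⟩
    · rw [if_neg h, ih]
      simp only [List.mem_cons]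
      constructor
      · rintro (ha | ⟨hy, ho⟩)
        · exact Or.inl ha
        · exact Or.inr ⟨Or.inr hy, ho⟩
      · rintro (ha | ⟨rfl | hy, ho⟩)
        · exact Or.inl ha
        · exact absurd ho h
        · exact Or.inr ⟨hy, ho⟩

theorem pvOddSet_nodup (l : List Int) (s : List Int) (h : s.Nodup) :
    (l.foldl (fun s x => if PySem.Int.mod x 2 ≠ 0 then PySem.Set.add s x else s) s).Nodup := by
  induction l generalizing s with
  | nil => exact h
  | cons y ys ih =>
    simp only [List.foldl_cons]
    split
    · exact ih _ (PySem.Set.nodup_add s y h)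
    · exact ih _ h

-- B's insertion
theorem pvInsDesc_mem (x : Int) (r : List Int) (a : Int) :
    a ∈ pvInsDesc x r ↔ a = x ∨ a ∈ r := by
  induction r with
  | nil => simp [pvInsDesc]
  | cons y ys ih =>
    simp only [pvInsDesc]
    split
    · simp only [List.mem_cons, ih]
      try tauto
    · split
      · rename_i heq
        subst heq
        simp only [List.mem_cons]
        try tauto
      · simp only [List.mem_cons]
        try tauto

theorem pvInsDesc_pairwise (x : Int) (r : List Int) (h : r.Pairwise (· > ·)) :
    (pvInsDesc x r).Pairwise (· > ·) := by
  induction r with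
  | nil => simp [pvInsDesc]
  | cons y ys ih =>
    rcases List.pairwise_cons.1 h with ⟨hy, hys⟩
    simp only [pvInsDesc]
    split
    · rename_i hlt
      refine List.pairwise_cons.2 ⟨?_, ih hys⟩
      intro z hz
      rcases (pvInsDesc_mem x ys z).1 hz with rfl | hz
      · exact hlt
      · exact hy z hz
    · split
      · exact h
      · rename_i hlt heq
        refine List.pairwise_cons.2 ⟨?_, h⟩
        intro z hz
        rcases List.mem_cons.1 hz with rfl | hz
        · omega
        · have := hy z hz; omega

theorem pvAltFold_mem (l : List Int) (r : List Int) (a : Int) :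
    (a ∈ l.foldl (fun r x => if PySem.Int.mod x 2 ≠ 0 then pvInsDesc x r else r) r ↔
      a ∈ r ∨ (a ∈ l ∧ PySem.Int.mod a 2 ≠ 0)) := by
  induction l generalizing r with
  | nil => simp
  | cons y ys ih =>
    simp only [List.foldl_cons]
    by_cases h : PySem.Int.mod y 2 ≠ 0
    · rw [if_pos h, ih, pvInsDesc_mem]
      simp only [List.mem_cons]
      constructor
      · rintro ((rfl | ha) | ⟨hy, ho⟩)
        · exact Or.inr ⟨Or.inl rfl, h⟩
        · exact Or.inl ha
        · exact Or.inr ⟨Or.inr hy, ho⟩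
      · rintro (ha | ⟨rfl | hy, ho⟩)
        · exact Or.inl (Or.inr ha)
        · exact Or.inl (Or.inl rfl)
        · exact Or.inr ⟨hy, ho⟩
    · rw [if_neg h, ih]
      simp only [List.mem_cons]
      constructor
      · rintro (ha | ⟨hy, ho⟩)
        · exact Or.inl ha
        · exact Or.inr ⟨Or.inr hy, ho⟩
      · rintro (ha | ⟨rfl | hy, ho⟩)
        · exact Or.inl ha
        · exact absurd ho h
        · exact Or.inr ⟨hy, ho⟩

theorem pvAltFold_pairwise (l : List Int) (r : List Int) (h : r.Pairwise (· > ·)) :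
    (l.foldl (fun r x => if PySem.Int.mod x 2 ≠ 0 then pvInsDesc x r else r) r).Pairwise (· > ·) := by
  induction l generalizing r with
  | nil => exact h
  | cons y ys ih =>
    simp only [List.foldl_cons]
    split
    · exact ih _ (pvInsDesc_pairwise y r h)
    · exact ih _ h

-- a strictly descending list is determined by its membership
theorem pvDescUnique (r₁ : List Int) : ∀ r₂ : List Int, r₁.Pairwise (· > ·) → r₂.Pairwise (· > ·) →
    (∀ a, a ∈ r₁ ↔ a ∈ r₂) → r₁ = r₂ := by
  induction r₁ with
  | nil =>
    intro r₂ _ _ hmem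
    cases r₂ with
    | nil => rfl
    | cons y ys => exact absurd ((hmem y).2 (by simp)) (by simp)
  | cons x xs ih =>
    intro r₂ h₁ h₂ hmem
    cases r₂ with
    | nil => exact absurd ((hmem x).1 (by simp)) (by simp)
    | cons y ys =>
      rcases List.pairwise_cons.1 h₁ with ⟨hx, hxs⟩
      rcases List.pairwise_cons.1 h₂ with ⟨hy, hys⟩
      have hxy : x = y := by
        rcases List.mem_cons.1 ((hmem x).1 (by simp)) with h | h
        · exact h
        · have h1 := hy x h
          rcases List.mem_cons.1 ((hmem y).2 (by simp)) with h' | h'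
          · omega
          · have := hx y h'; omega
      subst hxy
      have htails : xs = ys := by
        apply ih ys hxs hys
        intro a
        constructor
        · intro ha
          rcases List.mem_cons.1 ((hmem a).1 (List.mem_cons_of_mem _ ha)) with rfl | h
          · exact absurd (hx a ha) (by omega)
          · exact h
        · intro ha
          rcases List.mem_cons.1 ((hmem a).2 (List.mem_cons_of_mem _ ha)) with rfl | h
          · exact absurd (hy a ha) (by omega)
          · exact h
      rw [htails]

-- ===== VERDICT (by name: the statement is the Claim_ definition above) =====
theorem sorted_odds_spec : Claim_equal_sorted_odds := by
  intro l _
  unfold Spec_sorted_odds sorted_odds sorted_odds_alt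
  set s := l.foldl (fun s x => if PySem.Int.mod x 2 ≠ 0 then PySem.Set.add s x else s)
    PySem.Set.empty with hs
  have hnodup : s.Nodup := pvOddSet_nodup l _ List.nodup_nil
  have hperm := pvSelSort_perm s
  have hge := pvSelSort_pairwise s
  have hnd : (pvSelSort s).Nodup := hperm.nodup_iff.2 hnodup
  have hgt : (pvSelSort s).Pairwise (· > ·) := by
    have := hge.and hnd
    exact this.imp (fun h => by omega)
  apply pvDescUnique _ _ hgt (pvAltFold_pairwise l [] (by simp))
  intro a
  rw [hperm.mem_iff, hs, pvOddSet_mem, pvAltFold_mem]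
  simp [PySem.Set.empty]
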